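-- pv_equiv track=rewrite | github.com/4lul/sh | rest/words2col_rest.py | str2cell
-- ===== SOURCE A (Python) =====
-- def str2cell(line):
--     res = ""
--     iter_w = map(lambda word: f"| {word[:18].ljust(19)}|", line)
--     try:
--         pos = next(iter_w)
--     except:
--         return
--     while True:
--         try:
--             _pos = next(iter_w)
--             if len(line) < 3:
--                 res += pos + "".ljust(20)
--             else:
--                 pos = pos[:-1]
--                 res += pos
--             pos = _pos
--         except StopIteration:
--             res += pos
--             break
--     return res
-- ===== SOURCE B (Python) =====
-- def str2cell(line):
--     if not line:
--         return None
--     sep = ("|" + " " * 20) if len(line) < 3 else ""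
--     rev = []
--     suffix = "|"
--     for w in reversed(line):
--         rev.append(f"| {w[:18]:<19}" + suffix)
--         suffix = sep
--     return "".join(reversed(rev))
-- ===== Notes on version B (the rewrite author's own statement) =====
-- stated objective: alternative
-- what changed: A's forward one-element-lookahead iterator loop that appends whole cells and strips the trailing bar of non-last cells is replaced by a back-to-front pass with a rolling suffix: each word's cell body gets '|' if it is the last word and otherwise the length-dependent separator, so no bar is ever removed; pieces are collected in reverse and joined.
import Mathlib
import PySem

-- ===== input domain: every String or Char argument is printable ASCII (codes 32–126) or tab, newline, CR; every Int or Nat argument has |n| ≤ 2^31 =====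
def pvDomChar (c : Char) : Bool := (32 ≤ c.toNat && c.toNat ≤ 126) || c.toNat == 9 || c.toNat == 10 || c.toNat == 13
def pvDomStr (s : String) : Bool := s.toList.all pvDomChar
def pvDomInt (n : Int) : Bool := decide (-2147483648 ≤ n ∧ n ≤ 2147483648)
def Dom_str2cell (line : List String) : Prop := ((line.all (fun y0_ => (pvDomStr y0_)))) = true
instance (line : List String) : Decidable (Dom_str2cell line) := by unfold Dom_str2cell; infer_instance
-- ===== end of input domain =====

-- B replaces A's forward lookahead loop (which strips the trailing bar of non-last
-- cells) by a back-to-front pass with a rolling suffix; objective: alternative.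

-- cell body f"| {word[:18]:<19}" (no trailing bar); exact on ASCII:
-- slice [:18] = take 18, ljust(19)/:<19 pads on the right with spaces
def pvBody (w : String) : List Char :=
  let t := w.toList.take 18
  ['|', ' '] ++ t ++ List.replicate (19 - t.length) ' '

-- ===== PORT A =====
-- A's cell formatter f"| {word[:18].ljust(19)}|"
def pvCell (w : String) : List Char := pvBody w ++ ['|']

-- A's while-loop over the iterator: res accumulator, pos the current cell, rest the
-- lookahead; `small` is the loop-invariant test len(line) < 3; pos[:-1] = dropLast (exact)
def pvLoopA (small : Bool) (res pos : List Char) : List (List Char) → List Char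
  | [] => res ++ pos
  | p :: rest =>
      if small then pvLoopA small (res ++ pos ++ List.replicate 20 ' ') p rest
      else pvLoopA small (res ++ pos.dropLast) p rest

def str2cell (line : List String) : Option String :=
  match line.map pvCell with
  | [] => none            -- next() raised on the empty iterator: bare except returns None
  | pos :: rest => some (String.ofList (pvLoopA (decide (line.length < 3)) [] pos rest))

-- ===== PORT B =====
-- one step of B's loop over reversed(line): push body(w)+suffix, suffix becomes sep
def pvStepB (sep : List Char) (st : List Char × List (List Char)) (w : String) :
    List Char × List (List Char) :=
  (sep, st.2 ++ [pvBody w ++ st.1])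

def str2cell_alt (line : List String) : Option String :=
  match line with
  | [] => none
  | _ :: _ =>
      let sep := if line.length < 3 then '|' :: List.replicate 20 ' ' else []
      let st := line.reverse.foldl (pvStepB sep) (['|'], [])
      some (String.ofList st.2.reverse.flatten)

-- ===== PRECONDITION & SPEC =====
def Spec_str2cell (line : List String) (out : Option String) : Prop := out = str2cell_alt line
instance (line : List String) (out : Option String) : Decidable (Spec_str2cell line out) := by unfold Spec_str2cell; infer_instance

-- ===== CLAIM (what is proved, stated in full; the proofs are below) =====
def Claim_equal_str2cell : Prop := ∀ (line : List String), Dom_str2cell line → Spec_str2cell line (str2cell line)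

-- ===== LEMMAS AND PROOFS =====
-- common characterisation of the output for a nonempty line, as a forward recursion
def pvSpine (sep : List Char) (w : String) : List String → List Char
  | [] => pvBody w ++ ['|']
  | w' :: ws => pvBody w ++ sep ++ pvSpine sep w' ws

theorem pvLoopA_eq_spine (ws : List String) : ∀ (small : Bool) (w : String) (res : List Char),
    pvLoopA small res (pvCell w) (ws.map pvCell) =
      res ++ pvSpine (if small then '|' :: List.replicate 20 ' ' else []) w ws := by
  induction ws with
  | nil => intro small w res; cases small <;> simp [pvLoopA, pvSpine, pvCell]
  | cons w' rest ih =>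
      intro small w res
      cases small with
      | false =>
          simp only [List.map_cons]
          have hstep : pvLoopA false res (pvCell w) (pvCell w' :: rest.map pvCell)
              = pvLoopA false (res ++ (pvCell w).dropLast) (pvCell w') (rest.map pvCell) := rfl
          rw [hstep, ih]
          simp [pvSpine, pvCell]
      | true =>
          simp only [List.map_cons]
          have hstep : pvLoopA true res (pvCell w) (pvCell w' :: rest.map pvCell)
              = pvLoopA true (res ++ pvCell w ++ List.replicate 20 ' ') (pvCell w') (rest.map pvCell) := rfl
          rw [hstep, ih]
          simp [pvSpine, pvCell]

theorem foldB_eq_spine (ws : List String) : ∀ (sep : List Char) (w : String),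
    (((w :: ws).reverse.foldl (pvStepB sep) (['|'], [])).1 = sep) ∧
    (((w :: ws).reverse.foldl (pvStepB sep) (['|'], [])).2.reverse.flatten = pvSpine sep w ws) := by
  induction ws with
  | nil => intro sep w; simp [pvStepB, pvSpine]
  | cons w' rest ih =>
      intro sep w
      have hrev : (w :: w' :: rest).reverse = (w' :: rest).reverse ++ [w] := by simp
      rw [hrev, List.foldl_append]
      obtain ⟨h1, h2⟩ := ih sep w'
      constructor
      · simp [pvStepB]
      · simp [pvStepB, pvSpine, ← h2]

-- ===== VERDICT (by name: the statement is the Claim_ definition above) =====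
theorem str2cell_spec : Claim_equal_str2cell := by
  intro line _
  unfold Spec_str2cell str2cell str2cell_alt
  cases line with
  | nil => rfl
  | cons w ws =>
      simp only [List.map_cons]
      rw [pvLoopA_eq_spine, (foldB_eq_spine ws _ w).2]
      by_cases h : (w :: ws).length < 3
      · simp
      · simp
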